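-- pv_equiv track=rewrite | github.com/Jit-Paul-2008/Hexamind | ai-service/model_provider.py | _extract_section_summary
-- ===== SOURCE A (Python) =====
-- def _extract_section_summary(text: str, preferred: str, fallback: str) -> str:
--     text = text.replace("Analyzing request... ", "").replace("Analyzing request...", "").strip()
--     lines = text.splitlines()
--     section_indexes = [i for i, line in enumerate(lines) if line.strip() in {preferred, fallback}]
--     for index in section_indexes:
--         for candidate in lines[index + 1 :]:
--             stripped = candidate.strip()
--             if not stripped:
--                 continue
--             if stripped.startswith("## "):
--                 break
--             if stripped.startswith("-") or stripped[0].isdigit():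
--                 return stripped.lstrip("- ").strip()
--             return stripped
--     return text.split("\n", 1)[0].strip() or "Not available"
-- ===== SOURCE B (Python) =====
-- def _extract_section_summary(text: str, preferred: str, fallback: str) -> str:
--     text = text.replace("Analyzing request... ", "").replace("Analyzing request...", "").strip()
--     headers = {preferred, fallback}
--     looking = False
--     for line in text.splitlines():
--         stripped = line.strip()
--         if looking and stripped:
--             if stripped.startswith("## "):
--                 looking = False
--             elif stripped.startswith("-") or stripped[0].isdigit():
--                 return stripped.lstrip("- ").strip()
--             else:
--                 return stripped
--         if stripped in headers:
--             looking = True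
--     return text.split("\n", 1)[0].strip() or "Not available"
-- ===== Notes on version B (the rewrite author's own statement) =====
-- stated objective: simpler
-- what changed: Replaced A's two-phase approach (collect all header indexes, then a nested forward scan from each index) with a single linear pass over the lines that carries a boolean 'looking' state, preserving the content-before-header check ordering on '## ' lines.
import Mathlib
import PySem

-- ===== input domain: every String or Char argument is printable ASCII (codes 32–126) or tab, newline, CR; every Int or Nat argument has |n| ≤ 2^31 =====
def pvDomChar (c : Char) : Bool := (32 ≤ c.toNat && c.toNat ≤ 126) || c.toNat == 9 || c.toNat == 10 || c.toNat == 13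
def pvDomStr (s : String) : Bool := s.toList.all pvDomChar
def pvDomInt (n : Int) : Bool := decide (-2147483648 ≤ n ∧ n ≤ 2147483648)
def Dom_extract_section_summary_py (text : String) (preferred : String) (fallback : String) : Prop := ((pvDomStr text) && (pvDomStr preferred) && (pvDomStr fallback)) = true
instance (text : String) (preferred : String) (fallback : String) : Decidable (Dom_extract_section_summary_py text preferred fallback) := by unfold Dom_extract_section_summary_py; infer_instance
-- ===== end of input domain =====

-- B replaces A's two-phase scan (collect header indexes, then a nested forward scan from each)
-- with one linear pass carrying a boolean 'looking' state; objective: simpler (single pass).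

-- shared low-level pieces (both Python sources contain these identical expressions)
-- exact port of s.replace(...).replace(...).strip() of the first line of both Pythons
def pvNormalize (text : String) : String :=
  PySem.Str.strip (PySem.Str.replace (PySem.Str.replace text "Analyzing request... " "") "Analyzing request..." "")

-- exact port of stripped.lstrip("- "): drop leading chars from the set {'-', ' '}
def pvLstripDashSpace (s : String) : String :=
  String.mk (s.toList.dropWhile (fun c => c == '-' || c == ' '))

-- exact port of stripped[0].isdigit() (only used when stripped is non-empty)
def pvHeadIsDigit (s : String) : Bool :=
  match s.toList with
  | [] => false
  | c :: _ => PySem.Chars.isdigit c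

-- exact port of text.split("\n", 1)[0].strip() or "Not available"
-- (sep "\n" ≠ "" so splitMax? is some, and split always yields a non-empty list: the defaults are unreachable)
def pvFallbackLine (t : String) : String :=
  let h := PySem.Str.strip ((((PySem.Str.splitMax? t "\n" 1).getD []).headD ""))
  if h = "" then "Not available" else h

-- ===== PORT A =====
-- inner 'for candidate in lines[index+1:]' loop: some r = return r, none = break / loop exhausted
def pvInnerA : List String → Option String
  | [] => none
  | candidate :: rest =>
    let stripped := PySem.Str.strip candidate
    if stripped = "" then pvInnerA rest
    else if PySem.Str.startswith stripped "## " then none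
    else if PySem.Str.startswith stripped "-" || pvHeadIsDigit stripped then
      some (PySem.Str.strip (pvLstripDashSpace stripped))
    else some stripped

-- outer 'for index in section_indexes' loop
def pvOuterA (lines : List String) : List Int → Option String
  | [] => none
  | index :: restIdx =>
    match pvInnerA (PySem.List.slice lines (some (index + 1)) none) with
    | some r => some r
    | none => pvOuterA lines restIdx

def extract_section_summary_py (text : String) (preferred : String) (fallback : String) : String :=
  let text := pvNormalize text
  let lines := PySem.Str.splitlines text
  let section_indexes :=
    ((PySem.List.enumerate lines 0).filter
      (fun p => PySem.Str.strip p.2 == preferred || PySem.Str.strip p.2 == fallback)).map (·.1)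
  match pvOuterA lines section_indexes with
  | some r => r
  | none => pvFallbackLine text

-- ===== PORT B =====
-- single pass with the 'looking' flag; some r = return r, none = fell through the loop
def pvGoB (preferred fallback : String) : List String → Bool → Option String
  | [], _ => none
  | line :: rest, looking =>
    let stripped := PySem.Str.strip line
    if looking && stripped ≠ "" then
      if PySem.Str.startswith stripped "## " then
        pvGoB preferred fallback rest (stripped == preferred || stripped == fallback)
      else if PySem.Str.startswith stripped "-" || pvHeadIsDigit stripped then
        some (PySem.Str.strip (pvLstripDashSpace stripped))
      else some stripped
    else
      pvGoB preferred fallback rest (looking || stripped == preferred || stripped == fallback)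

def extract_section_summary_py_alt (text : String) (preferred : String) (fallback : String) : String :=
  let text := pvNormalize text
  match pvGoB preferred fallback (PySem.Str.splitlines text) false with
  | some r => r
  | none => pvFallbackLine text

-- ===== PRECONDITION & SPEC =====
def Spec_extract_section_summary_py (text : String) (preferred : String) (fallback : String) (out : String) : Prop := out = extract_section_summary_py_alt text preferred fallback
instance (text : String) (preferred : String) (fallback : String) (out : String) : Decidable (Spec_extract_section_summary_py text preferred fallback out) := by unfold Spec_extract_section_summary_py; infer_instance

-- ===== CLAIM (what is proved, stated in full; the proofs are below) =====
def Claim_equal_extract_section_summary_py : Prop := ∀ (text : String) (preferred : String) (fallback : String), Dom_extract_section_summary_py text preferred fallback → Spec_extract_section_summary_py text preferred fallback (extract_section_summary_py text preferred fallback)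

-- ===== LEMMAS AND PROOFS =====

-- structural reformulation of A's outer loop: scan for the next matching line, then run the inner scan
def pvOuterS (preferred fallback : String) : List String → Option String
  | [] => none
  | l :: rest =>
    if PySem.Str.strip l == preferred || PySem.Str.strip l == fallback then
      match pvInnerA rest with
      | some r => some r
      | none => pvOuterS preferred fallback rest
    else pvOuterS preferred fallback rest

theorem pvOuterA_eq_outerS (preferred fallback : String) (full : List String) :
    ∀ (ls : List String) (s : Nat), full.drop s = ls →
    pvOuterA full
      (((PySem.List.enumerate ls (s : Int)).filter
        (fun p => PySem.Str.strip p.2 == preferred || PySem.Str.strip p.2 == fallback)).map (·.1))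
      = pvOuterS preferred fallback ls := by
  intro ls
  induction ls with
  | nil => intro s h; simp [PySem.List.enumerate_nil, pvOuterA, pvOuterS]
  | cons l rest ih =>
    intro s h
    have hrest : full.drop (s + 1) = rest := by
      rw [← List.tail_drop, h]; rfl
    have hcast : ((s : Int) + 1) = ((s + 1 : Nat) : Int) := by push_cast; ring
    have hslice : PySem.List.slice full (some ((s : Int) + 1)) none = rest := by
      rw [hcast, PySem.List.slice_from_natCast, hrest]
    have ih' := ih (s + 1) hrest
    rw [← hcast] at ih'
    rw [PySem.List.enumerate_cons, List.filter_cons]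
    simp only [pvOuterS]
    cases hm : (PySem.Str.strip l == preferred || PySem.Str.strip l == fallback) with
    | true =>
      simp only [if_true, List.map_cons, pvOuterA, hslice, ih']
    | false =>
      simp only [Bool.false_eq_true, if_false, ih']

-- B's single pass equals A's structural outer loop (and, with looking = true, the inner scan first)
theorem pvGoB_eq (preferred fallback : String) :
    ∀ ls : List String,
      pvGoB preferred fallback ls false = pvOuterS preferred fallback ls ∧
      pvGoB preferred fallback ls true =
        (match pvInnerA ls with
         | some r => some r
         | none => pvOuterS preferred fallback ls) := by
  intro ls
  induction ls with
  | nil => constructor <;> simp [pvGoB, pvOuterS, pvInnerA]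
  | cons l rest ih =>
    obtain ⟨ihF, ihT⟩ := ih
    constructor
    · -- looking = false: B just watches for a header line
      simp only [pvGoB, pvOuterS, Bool.false_and, Bool.false_eq_true, if_false, Bool.false_or]
      cases hm : (PySem.Str.strip l == preferred || PySem.Str.strip l == fallback) with
      | true => rw [ihT]; simp
      | false => rw [ihF]; simp
    · -- looking = true: B mirrors A's inner scan on this suffix
      by_cases hne : PySem.Str.strip l = ""
      · -- blank line: the inner scan skips it; a blank line can itself match ("" header)
        simp only [pvGoB, pvInnerA, pvOuterS, hne]
        simp only [ne_eq, not_true_eq_false, decide_false, Bool.and_false, Bool.false_eq_true,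
          if_false, Bool.true_or, ihT]
        cases pvInnerA rest with
        | some r => cases hm : ("" == preferred || "" == fallback) <;> simp
        | none => cases hm : ("" == preferred || "" == fallback) <;> simp
      · simp only [pvGoB, pvInnerA, pvOuterS, ne_eq, hne, not_false_eq_true, decide_true,
          Bool.and_true]
        cases hh : PySem.Str.startswith (PySem.Str.strip l) "## " with
        | true =>
          -- a "## " line stops the current search but is still checked as a header
          cases hm : (PySem.Str.strip l == preferred || PySem.Str.strip l == fallback) with
          | true => rw [ihT]; simp
          | false => rw [ihF]; simp
        | false =>
          simp only [Bool.false_eq_true, if_false]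
          cases hd : (PySem.Str.startswith (PySem.Str.strip l) "-" || pvHeadIsDigit (PySem.Str.strip l)) <;>
            simp

-- ===== VERDICT (by name: the statement is the Claim_ definition above) =====
theorem extract_section_summary_py_spec : Claim_equal_extract_section_summary_py := by
  intro text preferred fallback _
  unfold Spec_extract_section_summary_py
  simp only [extract_section_summary_py, extract_section_summary_py_alt]
  have h1 := pvOuterA_eq_outerS preferred fallback (PySem.Str.splitlines (pvNormalize text))
    (PySem.Str.splitlines (pvNormalize text)) 0 (by simp)
  rw [Nat.cast_zero] at h1
  rw [h1, (pvGoB_eq preferred fallback (PySem.Str.splitlines (pvNormalize text))).1]
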